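-- pv_equiv track=rewrite | github.com/SamHaoYuan/DSANForAAAI2021 | Preprocess_dn.py | split_seq_train
-- ===== SOURCE A (Python) =====
-- filter_len = 2
--
-- def split_seq_train(sid, timestamp, seq):
--     x = []
--     t = []
--     s_id = []
--     for sid, seq, timestamp in zip(sid, seq, timestamp):
--         if len(seq) > filter_len:
--             x += [seq]
--             t += [timestamp]
--             s_id += [sid]
--         if filter_len == 2:
--             temp = len(seq) - 1
--         else:
--             temp = len(seq)
--         for i in range(1, temp):
--             x += [seq[:-i]]
--             t += [timestamp]
--             s_id += [sid]
--     return x, t, s_id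
-- ===== SOURCE B (Python) =====
-- def split_seq_train(sid, timestamp, seq):
--     def chain(q):
--         # all prefixes of q of length >= 2, longest first, built by recursively peeling the last element
--         if len(q) <= 2:
--             return [q]
--         return [q] + chain(q[:-1])
--     groups = [(s, ts, chain(q)) for s, q, ts in zip(sid, seq, timestamp) if len(q) > 2]
--     x = [p for _, _, ps in groups for p in ps]
--     t = [ts for _, ts, ps in groups for _ in ps]
--     s_id = [s for s, _, ps in groups for _ in ps]
--     return x, t, s_id
-- ===== Notes on version B (the rewrite author's own statement) =====
-- stated objective: alternative
-- what changed: B replaces A's single accumulator loop (conditional full-sequence append plus a descending seq[:-i] emission loop) with a recursive prefix-chain helper that peels the last element, a filter building per-sequence groups, and three staged flat-map passes assembling x, t and s_id separately.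
import Mathlib
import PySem

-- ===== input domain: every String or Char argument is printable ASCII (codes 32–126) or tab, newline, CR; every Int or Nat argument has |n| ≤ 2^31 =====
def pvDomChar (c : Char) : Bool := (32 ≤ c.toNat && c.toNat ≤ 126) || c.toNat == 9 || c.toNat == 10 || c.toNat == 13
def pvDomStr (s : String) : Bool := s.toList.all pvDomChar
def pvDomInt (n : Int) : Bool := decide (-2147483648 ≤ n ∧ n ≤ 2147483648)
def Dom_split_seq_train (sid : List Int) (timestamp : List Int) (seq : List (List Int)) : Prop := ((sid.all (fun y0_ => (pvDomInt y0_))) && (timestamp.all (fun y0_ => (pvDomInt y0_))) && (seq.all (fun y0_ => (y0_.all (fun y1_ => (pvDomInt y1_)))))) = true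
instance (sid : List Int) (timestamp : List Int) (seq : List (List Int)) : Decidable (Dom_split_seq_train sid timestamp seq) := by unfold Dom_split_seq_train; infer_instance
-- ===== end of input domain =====

-- B replaces A's accumulator loop by a recursive prefix-chain helper plus three staged
-- flat-map passes over the filtered triples (objective: alternative decomposition).

-- ===== PORT A =====
-- loop body of A: the conditional full append, then the inner 'for i in range(1, temp)' loop
def pvBodyA (acc : List (List Int) × List Int × List Int) (p : Int × List Int × Int) :
    List (List Int) × List Int × List Int :=
  match p with
  | (s, q, ts) =>
    let acc1 := if 2 < (q.length : Int) then (acc.1 ++ [q], acc.2.1 ++ [ts], acc.2.2 ++ [s]) else acc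
    let temp : Int := (q.length : Int) - 1   -- filter_len == 2 branch
    (PySem.List.pyRange 1 temp 1).foldl
      (fun a i => (a.1 ++ [PySem.List.slice q none (some (-i))], a.2.1 ++ [ts], a.2.2 ++ [s])) acc1

def split_seq_train (sid : List Int) (timestamp : List Int) (seq : List (List Int)) :
    List (List Int) × List Int × List Int :=
  (sid.zip (seq.zip timestamp)).foldl pvBodyA ([], [], [])

-- ===== PORT B =====
-- Source B's 'chain': all prefixes of q of length ≥ 2, longest first, peeling the last element
def pvChain (q : List Int) : List (List Int) :=
  if h : q.length ≤ 2 then [q]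
  else q :: pvChain (PySem.List.slice q none (some (-1)))
termination_by q.length
decreasing_by
  rw [PySem.List.slice_to_neg_one]
  simp only [List.length_dropLast]
  omega

def split_seq_train_alt (sid : List Int) (timestamp : List Int) (seq : List (List Int)) :
    List (List Int) × List Int × List Int :=
  let groups := ((sid.zip (seq.zip timestamp)).filter (fun p => 2 < p.2.1.length)).map
      (fun p => (p.1, p.2.2, pvChain p.2.1))
  (groups.flatMap (fun g => g.2.2),
   groups.flatMap (fun g => g.2.2.map (fun _ => g.2.1)),
   groups.flatMap (fun g => g.2.2.map (fun _ => g.1)))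

-- ===== PRECONDITION & SPEC =====
def Spec_split_seq_train (sid : List Int) (timestamp : List Int) (seq : List (List Int)) (out : List (List Int) × List Int × List Int) : Prop := out = split_seq_train_alt sid timestamp seq
instance (sid : List Int) (timestamp : List Int) (seq : List (List Int)) (out : List (List Int) × List Int × List Int) : Decidable (Spec_split_seq_train sid timestamp seq out) := by unfold Spec_split_seq_train; infer_instance

-- ===== CLAIM (what is proved, stated in full; the proofs are below) =====
def Claim_equal_split_seq_train : Prop := ∀ (sid : List Int) (timestamp : List Int) (seq : List (List Int)), Dom_split_seq_train sid timestamp seq → Spec_split_seq_train sid timestamp seq (split_seq_train sid timestamp seq)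

-- ===== LEMMAS AND PROOFS =====

-- a fold that appends one emitted element per iteration is an append of maps
lemma pv_foldl_emit (l : List Int) (f : Int → List Int) (ts s : Int)
    (acc : List (List Int) × List Int × List Int) :
    l.foldl (fun a i => (a.1 ++ [f i], a.2.1 ++ [ts], a.2.2 ++ [s])) acc
      = (acc.1 ++ l.map f, acc.2.1 ++ l.map (fun _ => ts), acc.2.2 ++ l.map (fun _ => s)) := by
  induction l generalizing acc with
  | nil => simp
  | cons h t ih => simp [List.foldl, ih]

-- pvChain q lists the prefixes q.take L, q.take (L-1), …, q.take 2
lemma pv_chain_eq (n : Nat) (q : List Int) (hq : q.length = n) (h2 : 2 ≤ n) :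
    pvChain q = (List.range (n - 1)).map (fun j => q.take (n - j)) := by
  induction n generalizing q with
  | zero => omega
  | succ m ih =>
    rw [pvChain]
    by_cases h : q.length ≤ 2
    · have hn : m + 1 = 2 := by omega
      rw [dif_pos h]
      have hm1 : m = 1 := by omega
      subst hm1
      simp [List.range_one, List.take_of_length_le (show q.length ≤ 2 by omega)]
    · rw [dif_neg h, PySem.List.slice_to_neg_one]
      have hm : 2 ≤ m := by omega
      have hdl : q.dropLast.length = m := by simp [List.length_dropLast, hq]
      rw [ih q.dropLast hdl hm]
      have hr : m + 1 - 1 = (m - 1) + 1 := by omega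
      rw [hr, List.range_succ_eq_map]
      simp only [List.map_cons, List.map_map]
      congr 1
      · rw [Nat.sub_zero, List.take_of_length_le (by omega)]
      · apply List.map_congr_left
        intro j hj
        simp only [List.mem_range] at hj
        simp only [Function.comp]
        rw [List.dropLast_eq_take, hq]
        rw [List.take_take]
        congr 1
        omega

-- A's emitted slice list (full seq then seq[:-i]) is the same prefix list
lemma pv_slicesA (q : List Int) (h : 3 ≤ q.length) :
    q :: (PySem.List.pyRange 1 ((q.length : Int) - 1) 1).map
        (fun i => PySem.List.slice q none (some (-i)))
      = (List.range (q.length - 1)).map (fun j => q.take (q.length - j)) := by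
  rw [PySem.List.pyRange_one]
  have h1 : ((q.length : Int) - 1 - 1).toNat = q.length - 2 := by omega
  rw [h1]
  have hr : q.length - 1 = (q.length - 2) + 1 := by omega
  rw [hr, List.range_succ_eq_map]
  simp only [List.map_cons, List.map_map]
  congr 1
  · rw [Nat.sub_zero, List.take_of_length_le (by omega)]
  · apply List.map_congr_left
    intro k hk
    simp only [List.mem_range] at hk
    simp only [Function.comp]
    have e1 : -((1 : Int) + k) = -(((k + 1 : Nat) : Int)) := by push_cast; ring
    rw [e1, PySem.List.slice_to_neg_natCast q (k + 1) (Nat.succ_pos k)]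

-- body of A on a kept triple emits exactly the chain of q
lemma pv_bodyA_keep (acc : List (List Int) × List Int × List Int) (s ts : Int) (q : List Int)
    (h : 2 < q.length) :
    pvBodyA acc (s, q, ts)
      = (acc.1 ++ pvChain q, acc.2.1 ++ (pvChain q).map (fun _ => ts),
         acc.2.2 ++ (pvChain q).map (fun _ => s)) := by
  have hZ : (2 : Int) < (q.length : Int) := by exact_mod_cast h
  have hlist : q :: (PySem.List.pyRange 1 ((q.length : Int) - 1) 1).map
      (fun i => PySem.List.slice q none (some (-i))) = pvChain q := by
    rw [pv_slicesA q (by omega), pv_chain_eq q.length q rfl (by omega)]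
  simp only [pvBodyA]
  rw [if_pos hZ, pv_foldl_emit]
  refine Prod.ext ?_ (Prod.ext ?_ ?_)
  · simpa [List.append_assoc] using congrArg (fun l => acc.1 ++ l) hlist
  · have hlen := congrArg List.length hlist
    simp only [List.length_cons, List.length_map] at hlen
    dsimp only
    simp only [List.map_const', List.append_assoc, List.singleton_append]
    rw [← List.replicate_succ, hlen]
  · have hlen := congrArg List.length hlist
    simp only [List.length_cons, List.length_map] at hlen
    dsimp only
    simp only [List.map_const', List.append_assoc, List.singleton_append]
    rw [← List.replicate_succ, hlen]

-- body of A on a dropped triple emits nothing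
lemma pv_bodyA_skip (acc : List (List Int) × List Int × List Int) (s ts : Int) (q : List Int)
    (h : ¬ 2 < q.length) :
    pvBodyA acc (s, q, ts) = acc := by
  have hZ : ¬ (2 : Int) < (q.length : Int) := by exact_mod_cast h
  have hle : ((q.length : Int) - 1) ≤ 1 := by omega
  simp only [pvBodyA]
  rw [if_neg hZ, PySem.List.pyRange_one_eq_nil hle]
  rfl

-- A's fold over the zipped triples is B's filter + group + three flat-maps
lemma pv_foldA (l : List (Int × List Int × Int)) (acc : List (List Int) × List Int × List Int) :
    l.foldl pvBodyA acc =
      (acc.1 ++ ((l.filter (fun p => 2 < p.2.1.length)).map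
          (fun p => (p.1, p.2.2, pvChain p.2.1))).flatMap (fun g => g.2.2),
       acc.2.1 ++ ((l.filter (fun p => 2 < p.2.1.length)).map
          (fun p => (p.1, p.2.2, pvChain p.2.1))).flatMap (fun g => g.2.2.map (fun _ => g.2.1)),
       acc.2.2 ++ ((l.filter (fun p => 2 < p.2.1.length)).map
          (fun p => (p.1, p.2.2, pvChain p.2.1))).flatMap (fun g => g.2.2.map (fun _ => g.1))) := by
  induction l generalizing acc with
  | nil => simp
  | cons p rest ih =>
    obtain ⟨s, q, ts⟩ := p
    simp only [List.foldl_cons]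
    by_cases h : 2 < q.length
    · rw [pv_bodyA_keep acc s ts q h, ih]
      simp [h, List.append_assoc]
    · rw [pv_bodyA_skip acc s ts q h, ih]
      simp [h]

theorem split_seq_train_spec : Claim_equal_split_seq_train := by
  intro sid timestamp seq _
  unfold Spec_split_seq_train split_seq_train split_seq_train_alt
  rw [pv_foldA]
  simp

-- ===== VERDICT (by name: the statement is the Claim_ definition above) =====
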